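-- pv_equiv track=rewrite | github.com/MurrayC7/RL_projects | DrawFist/RL_features.py | nuclease_util
-- ===== SOURCE A (Python) =====
-- def nuclease_util(actions, score):
--     nuclease = {}
--     i = 0
--     for a in actions:
--         for b in actions:
--             if score[(a, b)] == -1:
--                 nuclease[a + b] = str(i)
--                 i += 1
--     for a in actions:
--         for b in actions:
--             if score[(a, b)] == 1:
--                 nuclease[a + b] = str(i)
--                 i += 1
--     for a in actions:
--         for b in actions:
--             if score[(a, b)] == 0:
--                 nuclease[a + b] = str(i)
--                 i += 1
--     return nuclease
-- ===== SOURCE B (Python) =====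
-- def nuclease_util(actions, score):
--     # one pass over all pairs, bucketed by score, then one linear emit loop
--     neg, pos, zero = [], [], []
--     for a in actions:
--         for b in actions:
--             s = score[(a, b)]
--             if s == -1:
--                 neg.append(a + b)
--             elif s == 1:
--                 pos.append(a + b)
--             elif s == 0:
--                 zero.append(a + b)
--     nuclease = {}
--     i = 0
--     for key in neg + pos + zero:
--         nuclease[key] = str(i)
--         i += 1
--     return nuclease
-- ===== Notes on version B (the rewrite author's own statement) =====
-- stated objective: alternative
-- what changed: Replaced A's three separate n^2 scans over all action pairs (one per score value -1, 1, 0) by a single n^2 scan that buckets keys into three lists, followed by one linear emit loop assigning indices over the concatenation neg++pos++zero.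
import Mathlib
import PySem

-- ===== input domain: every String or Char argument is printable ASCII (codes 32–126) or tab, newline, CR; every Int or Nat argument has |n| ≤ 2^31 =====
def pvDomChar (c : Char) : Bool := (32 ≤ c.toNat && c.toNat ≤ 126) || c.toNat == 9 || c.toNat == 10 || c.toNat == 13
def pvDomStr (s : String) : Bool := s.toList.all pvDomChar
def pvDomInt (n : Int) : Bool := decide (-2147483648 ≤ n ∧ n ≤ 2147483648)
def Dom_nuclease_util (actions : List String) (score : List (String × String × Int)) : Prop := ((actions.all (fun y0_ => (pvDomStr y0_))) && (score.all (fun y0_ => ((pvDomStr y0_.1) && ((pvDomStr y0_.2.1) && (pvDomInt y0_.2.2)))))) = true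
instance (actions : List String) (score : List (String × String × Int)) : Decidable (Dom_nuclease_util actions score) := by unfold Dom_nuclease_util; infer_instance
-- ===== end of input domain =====

-- B replaces A's three full n^2 scans (scores -1, 1, 0) by a single n^2 bucketing scan plus one linear emit loop; same dict, one pass over the pairs.

-- ===== PORT A =====
-- score[(a, b)]: first matching key in the association list (Python dict lookup); none = KeyError
def pvLookA (score : List (String × String × Int)) (a b : String) : Option Int :=
  (score.find? (fun p => p.1 == a && p.2.1 == b)).map (fun p => p.2.2)

def nuclease_util (actions : List String) (score : List (String × String × Int)) : List (String × String) :=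
  let st0 : PySem.Dict String String × Int := (PySem.Dict.empty, 0)
  let st1 := actions.foldl (fun st a => actions.foldl (fun st b =>
      if pvLookA score a b == some (-1) then (st.1.insert (a ++ b) (PySem.Int.toStr st.2), st.2 + 1) else st) st) st0
  let st2 := actions.foldl (fun st a => actions.foldl (fun st b =>
      if pvLookA score a b == some 1 then (st.1.insert (a ++ b) (PySem.Int.toStr st.2), st.2 + 1) else st) st) st1
  let st3 := actions.foldl (fun st a => actions.foldl (fun st b =>
      if pvLookA score a b == some 0 then (st.1.insert (a ++ b) (PySem.Int.toStr st.2), st.2 + 1) else st) st) st2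
  st3.1.items

-- ===== PORT B =====
def pvLookB (score : List (String × String × Int)) (a b : String) : Option Int :=
  (score.find? (fun p => p.1 == a && p.2.1 == b)).map (fun p => p.2.2)

def nuclease_util_alt (actions : List String) (score : List (String × String × Int)) : List (String × String) :=
  let buckets : List String × List String × List String :=
    actions.foldl (fun t a => actions.foldl (fun t b =>
      let s := pvLookB score a b
      if s == some (-1) then (t.1 ++ [a ++ b], t.2.1, t.2.2)
      else if s == some 1 then (t.1, t.2.1 ++ [a ++ b], t.2.2)
      else if s == some 0 then (t.1, t.2.1, t.2.2 ++ [a ++ b])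
      else t) t) (([], [], []))
  let fin := (buckets.1 ++ buckets.2.1 ++ buckets.2.2).foldl
      (fun st k => (st.1.insert k (PySem.Int.toStr st.2), st.2 + 1))
      ((PySem.Dict.empty : PySem.Dict String String), (0 : Int))
  fin.1.items

-- ===== PRECONDITION & SPEC =====
-- Pre_ excludes inputs where some pair (a, b) of actions is missing from score: there Python A raises KeyError.
def Pre_nuclease_util (actions : List String) (score : List (String × String × Int)) : Prop :=
  (actions.all (fun a => actions.all (fun b => score.any (fun p => p.1 == a && p.2.1 == b)))) = true
instance (actions : List String) (score : List (String × String × Int)) : Decidable (Pre_nuclease_util actions score) := by unfold Pre_nuclease_util; infer_instance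

def pvWitness_nuclease_util : List String × (List (String × String × Int)) :=
  (["x", "y"], [("x", "x", -1), ("x", "y", 1), ("y", "x", 0), ("y", "y", 2)])

def Spec_nuclease_util (actions : List String) (score : List (String × String × Int)) (out : List (String × String)) : Prop := out = nuclease_util_alt actions score
instance (actions : List String) (score : List (String × String × Int)) (out : List (String × String)) : Decidable (Spec_nuclease_util actions score out) := by unfold Spec_nuclease_util; infer_instance

-- ===== CLAIM (what is proved, stated in full; the proofs are below) =====
def Claim_equal_nuclease_util : Prop := ∀ (actions : List String) (score : List (String × String × Int)), Dom_nuclease_util actions score → Pre_nuclease_util actions score → Spec_nuclease_util actions score (nuclease_util actions score)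

-- ===== LEMMAS AND PROOFS =====

-- the flattened pair list both programs scan
def pvPairs (actions : List String) : List (String × String) :=
  actions.flatMap (fun a => actions.map (fun b => (a, b)))

-- the emit step shared by A's three passes and B's emit loop
def pvEmit (st : PySem.Dict String String × Int) (k : String) : PySem.Dict String String × Int :=
  (st.1.insert k (PySem.Int.toStr st.2), st.2 + 1)

-- the keys of score class c, in pair order
def pvKeys (score : List (String × String × Int)) (actions : List String) (c : Int) : List String :=
  ((pvPairs actions).filter (fun p => pvLookA score p.1 p.2 == some c)).map (fun p => p.1 ++ p.2)

lemma pv_foldl_nested {σ α β : Type} (f : σ → α → β → σ) (l1 : List α) (l2 : List β) (init : σ) :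
    l1.foldl (fun s a => l2.foldl (fun s b => f s a b) s) init
      = (l1.flatMap (fun a => l2.map (fun b => (a, b)))).foldl (fun s p => f s p.1 p.2) init := by
  induction l1 generalizing init with
  | nil => rfl
  | cons a t ih => simp [List.foldl_append, List.foldl_map, ih]

lemma pv_foldl_if_key {σ α κ : Type} (q : α → Bool) (key : α → κ) (g : σ → κ → σ) (l : List α) (init : σ) :
    l.foldl (fun s x => if q x then g s (key x) else s) init
      = ((l.filter q).map key).foldl g init := by
  induction l generalizing init with
  | nil => rfl
  | cons x t ih => by_cases h : q x <;> simp [h, ih]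

lemma pv_passA (score : List (String × String × Int)) (actions : List String) (c : Int)
    (st : PySem.Dict String String × Int) :
    actions.foldl (fun st a => actions.foldl (fun st b =>
        if pvLookA score a b == some c then (st.1.insert (a ++ b) (PySem.Int.toStr st.2), st.2 + 1) else st) st) st
      = (pvKeys score actions c).foldl pvEmit st := by
  have h1 := pv_foldl_nested
    (f := fun (st : PySem.Dict String String × Int) (a b : String) =>
      if pvLookA score a b == some c then (st.1.insert (a ++ b) (PySem.Int.toStr st.2), st.2 + 1) else st)
    actions actions st
  have h2 := pv_foldl_if_key (fun p : String × String => pvLookA score p.1 p.2 == some c)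
    (fun p : String × String => p.1 ++ p.2) pvEmit
    (actions.flatMap (fun a => actions.map (fun b => (a, b)))) st
  exact h1.trans h2

lemma pv_bucket3 {α : Type} (v : α → Option Int) (key : α → String) (l : List α)
    (n p z : List String) :
    l.foldl (fun t x =>
        if v x == some (-1) then (t.1 ++ [key x], t.2.1, t.2.2)
        else if v x == some 1 then (t.1, t.2.1 ++ [key x], t.2.2)
        else if v x == some 0 then (t.1, t.2.1, t.2.2 ++ [key x])
        else t) (n, p, z)
      = (n ++ ((l.filter (fun x => v x == some (-1))).map key),
         p ++ ((l.filter (fun x => v x == some 1)).map key),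
         z ++ ((l.filter (fun x => v x == some 0)).map key)) := by
  induction l generalizing n p z with
  | nil => simp
  | cons x t ih =>
    simp only [List.foldl_cons, List.filter_cons]
    by_cases h1 : v x = some (-1)
    · rw [if_pos (by simp [h1] : (v x == some (-1)) = true), ih]
      simp [h1, List.append_assoc]
    · rw [if_neg (by simp [h1] : ¬ (v x == some (-1)) = true)]
      by_cases h2 : v x = some 1
      · rw [if_pos (by simp [h2] : (v x == some 1) = true), ih]
        simp [h2, List.append_assoc]
      · rw [if_neg (by simp [h2] : ¬ (v x == some 1) = true)]
        by_cases h3 : v x = some 0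
        · rw [if_pos (by simp [h3] : (v x == some 0) = true), ih]
          simp [h3, List.append_assoc]
        · rw [if_neg (by simp [h3] : ¬ (v x == some 0) = true), ih]
          simp [h1, h2, h3]

-- A in canonical form: the three passes emit the -1, 1, 0 key lists in turn
lemma pvA_eq (actions : List String) (score : List (String × String × Int)) :
    nuclease_util actions score
      = ((pvKeys score actions (-1) ++ pvKeys score actions 1 ++ pvKeys score actions 0).foldl
          pvEmit (PySem.Dict.empty, 0)).1.items := by
  show (actions.foldl (fun st a => actions.foldl (fun st b =>
          if pvLookA score a b == some 0 then (st.1.insert (a ++ b) (PySem.Int.toStr st.2), st.2 + 1) else st) st)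
        (actions.foldl (fun st a => actions.foldl (fun st b =>
          if pvLookA score a b == some 1 then (st.1.insert (a ++ b) (PySem.Int.toStr st.2), st.2 + 1) else st) st)
        (actions.foldl (fun st a => actions.foldl (fun st b =>
          if pvLookA score a b == some (-1) then (st.1.insert (a ++ b) (PySem.Int.toStr st.2), st.2 + 1) else st) st)
        (PySem.Dict.empty, 0)))).1.items = _
  rw [pv_passA, pv_passA, pv_passA, List.foldl_append, List.foldl_append]

-- B in the same canonical form: bucket, concatenate, emit
lemma pvB_eq (actions : List String) (score : List (String × String × Int)) :
    nuclease_util_alt actions score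
      = ((pvKeys score actions (-1) ++ pvKeys score actions 1 ++ pvKeys score actions 0).foldl
          pvEmit (PySem.Dict.empty, 0)).1.items := by
  have hb : actions.foldl (fun t a => actions.foldl (fun t b =>
        if pvLookB score a b == some (-1) then (t.1 ++ [a ++ b], t.2.1, t.2.2)
        else if pvLookB score a b == some 1 then (t.1, t.2.1 ++ [a ++ b], t.2.2)
        else if pvLookB score a b == some 0 then (t.1, t.2.1, t.2.2 ++ [a ++ b])
        else t) t) (([], [], []) : List String × List String × List String)
      = (pvKeys score actions (-1), pvKeys score actions 1, pvKeys score actions 0) := by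
    have h1 := pv_foldl_nested
      (f := fun (t : List String × List String × List String) (a b : String) =>
        if pvLookB score a b == some (-1) then (t.1 ++ [a ++ b], t.2.1, t.2.2)
        else if pvLookB score a b == some 1 then (t.1, t.2.1 ++ [a ++ b], t.2.2)
        else if pvLookB score a b == some 0 then (t.1, t.2.1, t.2.2 ++ [a ++ b])
        else t) actions actions ([], [], [])
    have h2 := pv_bucket3 (fun p : String × String => pvLookB score p.1 p.2)
      (fun p : String × String => p.1 ++ p.2)
      (actions.flatMap (fun a => actions.map (fun b => (a, b)))) [] [] []
    refine h1.trans (h2.trans ?_)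
    simp [pvKeys, pvPairs, pvLookA, pvLookB]
  show ((actions.foldl (fun t a => actions.foldl (fun t b =>
        if pvLookB score a b == some (-1) then (t.1 ++ [a ++ b], t.2.1, t.2.2)
        else if pvLookB score a b == some 1 then (t.1, t.2.1 ++ [a ++ b], t.2.2)
        else if pvLookB score a b == some 0 then (t.1, t.2.1, t.2.2 ++ [a ++ b])
        else t) t) (([], [], []) : List String × List String × List String)).1
      ++ (actions.foldl (fun t a => actions.foldl (fun t b =>
        if pvLookB score a b == some (-1) then (t.1 ++ [a ++ b], t.2.1, t.2.2)
        else if pvLookB score a b == some 1 then (t.1, t.2.1 ++ [a ++ b], t.2.2)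
        else if pvLookB score a b == some 0 then (t.1, t.2.1, t.2.2 ++ [a ++ b])
        else t) t) (([], [], []) : List String × List String × List String)).2.1
      ++ (actions.foldl (fun t a => actions.foldl (fun t b =>
        if pvLookB score a b == some (-1) then (t.1 ++ [a ++ b], t.2.1, t.2.2)
        else if pvLookB score a b == some 1 then (t.1, t.2.1 ++ [a ++ b], t.2.2)
        else if pvLookB score a b == some 0 then (t.1, t.2.1, t.2.2 ++ [a ++ b])
        else t) t) (([], [], []) : List String × List String × List String)).2.2).foldl
      pvEmit (PySem.Dict.empty, 0) |>.1.items = _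
  rw [hb]

-- ===== VERDICT (by name: the statement is the Claim_ definition above) =====
theorem nuclease_util_spec : Claim_equal_nuclease_util := by
  intro actions score _hdom _hpre
  unfold Spec_nuclease_util
  rw [pvA_eq, pvB_eq]
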